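-- pv_equiv track=rewrite | github.com/cobeggs8735/Engineering-Computation-Lab-1 | Exercise Files/Week 11/Lab11B_Problem6b.py | net_profit
-- ===== SOURCE A (Python) =====
-- def net_profit(names, costs, values):
--     if len(names) == len(costs) == len(values):
--         profit = {}
--         for i in range(len(names)):
--             profit.update({values[i] - costs[i] : names[i]})
--         profit_keys = list(profit.keys())
--         profit_keys.sort()
--         return profit.get(profit_keys[0], 'N/A') #profit_keys[0]
-- ===== SOURCE B (Python) =====
-- def net_profit(names, costs, values):
--     if len(names) == len(costs) == len(values):
--         best = 0
--         for i in range(1, len(names)):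
--             if values[i] - costs[i] <= values[best] - costs[best]:
--                 best = i
--         return names[best]
-- ===== Notes on version B (the rewrite author's own statement) =====
-- stated objective: faster
-- what changed: A builds a dict keyed by profit (last name wins per key), sorts all keys and looks up the smallest; B does a single linear argmin scan with <= so the last minimal-profit index wins, no dict and no sort.
import Mathlib
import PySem

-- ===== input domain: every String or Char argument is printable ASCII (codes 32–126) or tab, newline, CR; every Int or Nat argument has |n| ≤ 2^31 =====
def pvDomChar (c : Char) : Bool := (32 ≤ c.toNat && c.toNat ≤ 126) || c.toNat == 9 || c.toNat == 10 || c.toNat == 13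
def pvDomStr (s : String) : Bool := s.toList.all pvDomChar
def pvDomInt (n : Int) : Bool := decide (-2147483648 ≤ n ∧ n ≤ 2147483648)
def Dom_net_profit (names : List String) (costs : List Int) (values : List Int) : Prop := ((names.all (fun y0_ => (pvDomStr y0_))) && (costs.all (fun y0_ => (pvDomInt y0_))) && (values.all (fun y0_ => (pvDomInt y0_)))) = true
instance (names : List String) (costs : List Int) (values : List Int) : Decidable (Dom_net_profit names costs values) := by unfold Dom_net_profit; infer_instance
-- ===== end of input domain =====

-- B replaces A's dict-of-profits + full sort + lookup with a single linear
-- last-wins argmin scan (objective: faster, O(n) vs A's O(n^2) sort of up to n keys).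

-- values[i] - costs[i]; used by both ports. Inside the equal-length guard every
-- accessed index is in range, so the default of pyGetD is never taken (exact there).
def pvProfit (costs values : List Int) (i : Int) : Int :=
  PySem.List.pyGetD values i 0 - PySem.List.pyGetD costs i 0

-- ===== PORT A =====
def net_profit (names : List String) (costs : List Int) (values : List Int) : Option String :=
  if names.length = costs.length ∧ costs.length = values.length then
    let d := (PySem.List.pyRange 0 names.length 1).foldl
      (fun d i => d.insert (pvProfit costs values i) (PySem.List.pyGetD names i "")) PySem.Dict.empty
    let ks := PySem.List.sorted d.keys (fun k => k) false
    match ks.head? with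
    | some k => some (d.getD k "N/A")
    | none => none   -- profit_keys[0] raises IndexError (empty input); excluded by Pre_
  else none

-- ===== PORT B =====
def net_profit_alt (names : List String) (costs : List Int) (values : List Int) : Option String :=
  if names.length = costs.length ∧ costs.length = values.length then
    let best := (PySem.List.pyRange 1 names.length 1).foldl
      (fun b i => if pvProfit costs values i ≤ pvProfit costs values b then i else b) 0
    PySem.List.pyGet? names best   -- names[best]; none = IndexError (empty input), excluded by Pre_
  else none

-- ===== PRECONDITION & SPEC =====
-- Pre_ excludes exactly the inputs where A raises IndexError: three equal-length
-- EMPTY lists (profit_keys[0] on an empty dict); B raises there too (names[0]).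
def Pre_net_profit (names : List String) (costs : List Int) (values : List Int) : Prop :=
  names.length = costs.length ∧ costs.length = values.length → names ≠ []
instance (names : List String) (costs : List Int) (values : List Int) : Decidable (Pre_net_profit names costs values) := by unfold Pre_net_profit; infer_instance
def pvWitness_net_profit : List String × List Int × List Int := (["a", "b"], [1, 2], [5, 1])

def Spec_net_profit (names : List String) (costs : List Int) (values : List Int) (out : Option String) : Prop := out = net_profit_alt names costs values
instance (names : List String) (costs : List Int) (values : List Int) (out : Option String) : Decidable (Spec_net_profit names costs values out) := by unfold Spec_net_profit; infer_instance

-- ===== CLAIM (what is proved, stated in full; the proofs are below) =====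
def Claim_equal_net_profit : Prop := ∀ (names : List String) (costs : List Int) (values : List Int), Dom_net_profit names costs values → Pre_net_profit names costs values → Spec_net_profit names costs values (net_profit names costs values)

-- ===== LEMMAS AND PROOFS =====

-- Invariant carried through both loops simultaneously: b is in range, its profit
-- is a minimal key of the dict, and the dict stores names[b] at that key.
theorem pv_inv (costs values : List Int) (names : List String) (l : List Int)
    (d : PySem.Dict Int String) (b : Int)
    (hb : 0 ≤ b ∧ b < (names.length : Int))
    (hl : ∀ i ∈ l, 0 ≤ i ∧ i < (names.length : Int))
    (h1 : ∀ k ∈ d.keys, pvProfit costs values b ≤ k)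
    (h2 : pvProfit costs values b ∈ d.keys)
    (h3 : d.getD (pvProfit costs values b) "N/A" = PySem.List.pyGetD names b "") :
    (fun d' b' =>
    (0 ≤ b' ∧ b' < (names.length : Int)) ∧ (∀ k ∈ d'.keys, pvProfit costs values b' ≤ k) ∧
      pvProfit costs values b' ∈ d'.keys ∧
      d'.getD (pvProfit costs values b') "N/A" = PySem.List.pyGetD names b' "")
    (l.foldl (fun d i => d.insert (pvProfit costs values i) (PySem.List.pyGetD names i "")) d)
    (l.foldl (fun b i => if pvProfit costs values i ≤ pvProfit costs values b then i else b) b) := by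
  simp only []
  induction l generalizing d b with
  | nil => exact ⟨hb, h1, h2, h3⟩
  | cons i l ih =>
    obtain ⟨hi, hl'⟩ := List.forall_mem_cons.mp hl
    simp only [List.foldl_cons]
    by_cases hc : pvProfit costs values i ≤ pvProfit costs values b
    · simp only [hc, if_true]
      refine ih _ i hi hl' ?_ ?_ ?_
      · intro k hk
        rcases (PySem.Dict.mem_keys_insert _ _ _ _).mp hk with h | h
        · omega
        · exact le_trans hc (h1 k h)
      · exact (PySem.Dict.mem_keys_insert _ _ _ _).mpr (Or.inl rfl)
      · exact PySem.Dict.getD_insert_self ..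
    · simp only [hc, if_false]
      have hne : pvProfit costs values b ≠ pvProfit costs values i := by omega
      refine ih _ b hb hl' ?_ ?_ ?_
      · intro k hk
        rcases (PySem.Dict.mem_keys_insert _ _ _ _).mp hk with h | h
        · omega
        · exact h1 k h
      · exact (PySem.Dict.mem_keys_insert _ _ _ _).mpr (Or.inr h2)
      · rw [PySem.Dict.getD_insert_of_ne _ _ _ hne]; exact h3

-- ===== VERDICT (by name: the statement is the Claim_ definition above) =====
theorem net_profit_spec : Claim_equal_net_profit := by
  intro names costs values _ hpre
  unfold Spec_net_profit net_profit net_profit_alt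
  by_cases hlen : names.length = costs.length ∧ costs.length = values.length
  · rw [if_pos hlen, if_pos hlen]
    have hne := hpre hlen
    have hn : (0 : Int) < names.length := by
      cases names with
      | nil => exact absurd rfl hne
      | cons x xs => simp
    rw [PySem.List.pyRange_one_cons hn]
    simp only [List.foldl_cons, zero_add]
    have hl : ∀ i ∈ PySem.List.pyRange 1 names.length 1, 0 ≤ i ∧ i < (names.length : Int) := by
      intro i hi
      have := (PySem.List.mem_pyRange_one).mp hi
      omega
    have hinv := pv_inv costs values names (PySem.List.pyRange 1 names.length 1)
      (PySem.Dict.empty.insert (pvProfit costs values 0) (PySem.List.pyGetD names 0 ""))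
      0 ⟨le_refl 0, hn⟩ hl
      (by
        intro k hk
        rcases (PySem.Dict.mem_keys_insert _ _ _ _).mp hk with h | h
        · omega
        · simp [PySem.Dict.keys_empty] at h)
      ((PySem.Dict.mem_keys_insert _ _ _ _).mpr (Or.inl rfl))
      (PySem.Dict.getD_insert_self ..)
    obtain ⟨hb', hmin, hmem, hget⟩ := hinv
    set d' := (PySem.List.pyRange 1 names.length 1).foldl
      (fun d i => d.insert (pvProfit costs values i) (PySem.List.pyGetD names i ""))
      (PySem.Dict.empty.insert (pvProfit costs values 0) (PySem.List.pyGetD names 0 "")) with hd'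
    set b' := (PySem.List.pyRange 1 names.length 1).foldl
      (fun b i => if pvProfit costs values i ≤ pvProfit costs values b then i else b) 0 with hbdef
    -- the sorted key list is nonempty and its head is exactly pvProfit b'
    have hkeysne : d'.keys ≠ [] := fun h => by rw [h] at hmem; exact (List.not_mem_nil) hmem
    have hsne : PySem.List.sorted d'.keys (fun k => k) false ≠ [] := by
      intro h
      have := PySem.List.sorted_perm d'.keys (fun k : Int => k) false
      rw [h] at this
      exact hkeysne (List.Perm.nil_eq this).symm
    cases hs : PySem.List.sorted d'.keys (fun k => k) false with
    | nil => exact absurd hs hsne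
    | cons m t =>
      have hmk : m ∈ d'.keys := by
        have : m ∈ PySem.List.sorted d'.keys (fun k : Int => k) false := by
          rw [hs]; exact List.mem_cons_self ..
        exact (PySem.List.mem_sorted _ _ _ _).mp this
      have h1 : pvProfit costs values b' ≤ m := hmin m hmk
      have h2 : m ≤ pvProfit costs values b' :=
        PySem.List.key_head_sorted_le _ _ hs _ hmem
      have hm : m = pvProfit costs values b' := le_antisymm h2 h1
      simp only [List.head?_cons, hm, hget]
      rw [PySem.List.pyGetD_eq_getElem _ _ hb'.1 hb'.2,
          PySem.List.pyGet?_eq_some_getElem _ hb'.1 hb'.2]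
  · simp [hlen]
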